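-- pv_equiv track=rewrite | github.com/sulfun/destiny-book-generator | scrapers/numerology.py | challenge_numbers
-- ===== SOURCE A (Python) =====
-- MASTER_NUMBERS = {11, 22, 33}
--
-- def reduce_to_single(n, preserve_master=True):
--     """
--     숫자를 단일 자릿수로 환원
--     마스터넘버(11, 22, 33)는 보존
--     """
--     while n > 9:
--         if preserve_master and n in MASTER_NUMBERS:
--             return n
--         n = sum(int(d) for d in str(n))
--     return n
--
-- def challenge_numbers(month, day, year):
--     """도전수 (Challenge Numbers)"""
--     m = reduce_to_single(month)
--     d = reduce_to_single(day)
--     y = reduce_to_single(sum(int(x) for x in str(year)))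
--
--     c1 = abs(m - d)
--     c2 = abs(d - y)
--     c3 = abs(c1 - c2)
--     c4 = abs(m - y)
--
--     return [
--         reduce_to_single(c1, preserve_master=False),
--         reduce_to_single(c2, preserve_master=False),
--         reduce_to_single(c3, preserve_master=False),
--         reduce_to_single(c4, preserve_master=False),
--     ]
-- ===== SOURCE B (Python) =====
-- MASTER_NUMBERS = {11, 22, 33}
--
-- def _digsum(n):
--     s = 0
--     while n > 0:
--         s += n % 10
--         n //= 10
--     return s
--
-- def _reduce_master(n):
--     if n <= 9 or n in MASTER_NUMBERS:
--         return n
--     return _reduce_master(_digsum(n))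
--
-- def _droot(v):
--     # digital root closed form for v >= 0
--     return 0 if v == 0 else 1 + (v - 1) % 9
--
-- def challenge_numbers(month, day, year):
--     """도전수 (Challenge Numbers)"""
--     m = _reduce_master(month)
--     d = _reduce_master(day)
--     y = _reduce_master(_digsum(year))
--
--     c1 = abs(m - d)
--     c2 = abs(d - y)
--     c4 = abs(m - y)
--
--     return [_droot(c1), _droot(c2), _droot(abs(c1 - c2)), _droot(c4)]
-- ===== Notes on version B (the rewrite author's own statement) =====
-- stated objective: simpler
-- what changed: The four challenge values are reduced to a digit with the constant-time digital-root formula (0 if v==0 else 1+(v-1)%9) instead of A's repeated digit-summing while-loop, and digit sums are computed arithmetically (%10, //10) instead of via str(); the master-preserving reduction is kept, as a recursion, only for m, d, y.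
-- outside the precondition, e.g. on challenge_numbers(1, 1, -1): A raises ValueError, B returns [0, 1, 1, 1]
import Mathlib
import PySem

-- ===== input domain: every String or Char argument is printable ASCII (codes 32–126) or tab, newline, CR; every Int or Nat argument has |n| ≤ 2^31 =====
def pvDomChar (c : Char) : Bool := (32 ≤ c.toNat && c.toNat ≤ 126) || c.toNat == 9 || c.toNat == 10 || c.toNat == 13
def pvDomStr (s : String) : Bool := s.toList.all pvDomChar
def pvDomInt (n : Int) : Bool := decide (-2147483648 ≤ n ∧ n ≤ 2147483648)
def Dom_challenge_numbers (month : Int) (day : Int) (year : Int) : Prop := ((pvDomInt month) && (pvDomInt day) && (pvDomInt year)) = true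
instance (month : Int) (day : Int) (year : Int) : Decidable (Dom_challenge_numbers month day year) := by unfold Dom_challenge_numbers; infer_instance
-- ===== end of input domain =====

-- B replaces A's digit-summing while-loop on the four outputs by the digital-root
-- closed form (0 if v==0 else 1+(v-1)%9) and sums digits arithmetically instead of
-- via str(); objective: simpler/idiomatic. A raises ValueError for negative year
-- (int('-')); Pre_ excludes year < 0.


-- ===== PORT A =====
-- int(d) for a one-character string d; the .getD 0 default is never reached where A
-- calls it (only on decimal digit characters of str(n) with n > 9, resp. year ≥ 0 by Pre_)
def pvCharInt (c : Char) : Int := (PySem.Int.ofChars? [c]).getD 0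

-- sum(int(d) for d in str(n))
def pvDigitSumStr (n : Int) : Int := ((PySem.Int.toChars n).map pvCharInt).sum

-- MASTER_NUMBERS = {11, 22, 33}
def pvMASTER_NUMBERS : List Int := [11, 22, 33]

-- reduce_to_single's while-loop over state n; fuel n.toNat is a pure totality guard:
-- each pass strictly decreases n (the digit sum of n > 9 is < n), so it is never exhausted
def pvReduceLoop (preserve_master : Bool) : Nat → Int → Int
  | 0, n => n
  | fuel + 1, n =>
    if 9 < n then
      if preserve_master && pvMASTER_NUMBERS.contains n then n
      else pvReduceLoop preserve_master fuel (pvDigitSumStr n)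
    else n

def reduce_to_single (n : Int) (preserve_master : Bool) : Int :=
  pvReduceLoop preserve_master n.toNat n

def challenge_numbers (month : Int) (day : Int) (year : Int) : List Int :=
  let m := reduce_to_single month true
  let d := reduce_to_single day true
  let y := reduce_to_single (pvDigitSumStr year) true
  let c1 := |m - d|
  let c2 := |d - y|
  let c3 := |c1 - c2|
  let c4 := |m - y|
  [reduce_to_single c1 false, reduce_to_single c2 false,
   reduce_to_single c3 false, reduce_to_single c4 false]

-- ===== PORT B =====
-- _digsum's while-loop over state (n, s); fuel n.toNat is a pure totality guard:
-- n // 10 < n while n > 0, so it is never exhausted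
def pvDigsumLoop : Nat → Int → Int → Int
  | 0, _, s => s
  | fuel + 1, n, s =>
    if 0 < n then pvDigsumLoop fuel (PySem.Int.floordiv n 10) (s + PySem.Int.mod n 10) else s

def pvDigsum (n : Int) : Int := pvDigsumLoop n.toNat n 0

-- _reduce_master's recursion; fuel n.toNat is a pure totality guard (digit sum of n > 9 is < n);
-- n in MASTER_NUMBERS ported as the explicit disjunction
def pvReduceMasterLoop : Nat → Int → Int
  | 0, n => n
  | fuel + 1, n =>
    if n ≤ 9 ∨ n = 11 ∨ n = 22 ∨ n = 33 then n
    else pvReduceMasterLoop fuel (pvDigsum n)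

def pvReduceMaster (n : Int) : Int := pvReduceMasterLoop n.toNat n

-- _droot: digital-root closed form (for v ≥ 0)
def pvDroot (v : Int) : Int := if v = 0 then 0 else 1 + PySem.Int.mod (v - 1) 9

def challenge_numbers_alt (month : Int) (day : Int) (year : Int) : List Int :=
  let m := pvReduceMaster month
  let d := pvReduceMaster day
  let y := pvReduceMaster (pvDigsum year)
  let c1 := |m - d|
  let c2 := |d - y|
  let c4 := |m - y|
  [pvDroot c1, pvDroot c2, pvDroot (|c1 - c2|), pvDroot c4]

-- ===== PRECONDITION & SPEC =====
-- Pre_ excludes year < 0, on which A raises ValueError (int('-') on the sign of str(year)).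
def Pre_challenge_numbers (month : Int) (day : Int) (year : Int) : Prop := 0 ≤ year
instance (month : Int) (day : Int) (year : Int) : Decidable (Pre_challenge_numbers month day year) := by unfold Pre_challenge_numbers; infer_instance
def pvWitness_challenge_numbers : Int × Int × Int := (7, 23, 1990)

def Spec_challenge_numbers (month : Int) (day : Int) (year : Int) (out : List Int) : Prop := out = challenge_numbers_alt month day year
instance (month : Int) (day : Int) (year : Int) (out : List Int) : Decidable (Spec_challenge_numbers month day year out) := by unfold Spec_challenge_numbers; infer_instance

-- ===== CLAIM (what is proved, stated in full; the proofs are below) =====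
def Claim_equal_challenge_numbers : Prop := ∀ (month : Int) (day : Int) (year : Int), Dom_challenge_numbers month day year → Pre_challenge_numbers month day year → Spec_challenge_numbers month day year (challenge_numbers month day year)

-- ===== LEMMAS AND PROOFS =====
lemma pvCharInt_digitChar (r : Nat) (h : r < 10) : pvCharInt (Nat.digitChar r) = (r : Int) := by
  interval_cases r <;> rfl

lemma pvCoreSum : ∀ (f n : Nat) (ds : List Char), n / 10 ≤ f →
    ((Nat.toDigitsCore 10 (f+1) n ds).map pvCharInt).sum
      = ((Nat.digits 10 n).sum : Int) + ((ds.map pvCharInt).sum) := by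
  intro f
  induction f with
  | zero =>
    intro n ds h
    have hn : n < 10 := by omega
    rw [Nat.toDigitsCore]
    simp only [show n / 10 = 0 by omega]
    rcases Nat.eq_zero_or_pos n with h0 | h0
    · subst h0; simp [pvCharInt_digitChar 0 (by omega)]
    · rw [Nat.digits_def' (by norm_num : (1:ℕ) < 10) h0]
      simp [Nat.mod_eq_of_lt hn, show n / 10 = 0 by omega,
        pvCharInt_digitChar n hn]
  | succ f ih =>
    intro n ds h
    rw [Nat.toDigitsCore]
    by_cases h0 : n / 10 = 0
    · simp only [h0]
      have hn : n < 10 := by omega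
      rcases Nat.eq_zero_or_pos n with hz | hz
      · subst hz; simp [pvCharInt_digitChar 0 (by omega)]
      · rw [Nat.digits_def' (by norm_num : (1:ℕ) < 10) hz]
        simp [Nat.mod_eq_of_lt hn, h0, pvCharInt_digitChar n hn]
    · rw [if_neg h0]
      have hrec : n / 10 / 10 ≤ f := by omega
      rw [ih (n/10) (Nat.digitChar (n % 10) :: ds) hrec]
      have hpos : 0 < n := by omega
      rw [Nat.digits_def' (by norm_num : (1:ℕ) < 10) hpos]
      simp [pvCharInt_digitChar (n % 10) (Nat.mod_lt n (by omega))]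
      ring

lemma pvDigitSumStr_eq (n : Int) (h : 0 ≤ n) :
    pvDigitSumStr n = ((Nat.digits 10 n.toNat).sum : Int) := by
  unfold pvDigitSumStr PySem.Int.toChars
  rw [if_neg (by omega)]
  unfold Nat.toDigits
  rw [pvCoreSum n.toNat n.toNat [] (by omega)]
  simp

lemma pvDigitsSumPos : ∀ n : Nat, 0 < n → 0 < (Nat.digits 10 n).sum := by
  intro n
  induction n using Nat.strong_induction_on with
  | _ n ih =>
    intro hpos
    rw [Nat.digits_def' (by norm_num : (1:ℕ) < 10) hpos]
    rcases Nat.eq_zero_or_pos (n % 10) with hm | hm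
    · have h10 : 0 < n / 10 := by omega
      have := ih (n / 10) (by omega) h10
      simp; omega
    · simp; omega

lemma pvDigitsSumLt (n : Nat) (h : 10 ≤ n) : (Nat.digits 10 n).sum < n := by
  rw [Nat.digits_def' (by norm_num : (1:ℕ) < 10) (by omega)]
  have := Nat.digit_sum_le 10 (n / 10)
  simp
  omega

lemma pvDigitSumStr_lt (n : Int) (h : 9 < n) : pvDigitSumStr n < n := by
  rw [pvDigitSumStr_eq n (by omega)]
  have := pvDigitsSumLt n.toNat (by omega)
  omega

lemma pvDigitSumStr_nonneg (n : Int) (h : 0 ≤ n) : 0 ≤ pvDigitSumStr n := by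
  rw [pvDigitSumStr_eq n h]; positivity

lemma pvDigsumLoop_eq : ∀ (f : Nat) (n s : Int), n.toNat ≤ f → 0 ≤ n →
    pvDigsumLoop f n s = s + ((Nat.digits 10 n.toNat).sum : Int) := by
  intro f
  induction f with
  | zero =>
    intro n s hf hn
    have : n = 0 := by omega
    subst this
    simp [pvDigsumLoop]
  | succ f ih =>
    intro n s hf hn
    rw [pvDigsumLoop]
    by_cases h : 0 < n
    · rw [if_pos h]
      rw [PySem.Int.floordiv_eq_ediv_of_pos (by norm_num), PySem.Int.mod_eq_emod_of_pos (by norm_num)]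
      have hlt : n / 10 < n := by omega
      have hge : 0 ≤ n / 10 := by omega
      rw [ih (n / 10) _ (by omega) hge]
      rw [Nat.digits_def' (by norm_num : (1:ℕ) < 10) (by omega : 0 < n.toNat)]
      have h1 : (n / 10).toNat = n.toNat / 10 := by omega
      have h2 : n % 10 = ((n.toNat % 10 : Nat) : Int) := by omega
      rw [h1, h2]
      simp only [List.sum_cons]
      push_cast
      ring
    · rw [if_neg h]
      have : n = 0 := by omega
      subst this
      simp

lemma pvDigsum_eq (n : Int) (h : 0 ≤ n) : pvDigsum n = ((Nat.digits 10 n.toNat).sum : Int) := by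
  unfold pvDigsum; rw [pvDigsumLoop_eq n.toNat n 0 le_rfl h]; ring

lemma pvDigsum_lt (n : Int) (h : 9 < n) : pvDigsum n < n := by
  rw [pvDigsum_eq n (by omega)]
  have := pvDigitsSumLt n.toNat (by omega)
  omega

lemma pvDigsum_nonneg (n : Int) (h : 0 ≤ n) : 0 ≤ pvDigsum n := by
  rw [pvDigsum_eq n h]; positivity

-- the two preserve_master reductions agree (fuel never exhausted on either side)
lemma pvReduce_true_aux : ∀ (k f g : Nat) (n : Int), n.toNat ≤ k → n.toNat ≤ f → n.toNat ≤ g →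
    pvReduceLoop true f n = pvReduceMasterLoop g n := by
  intro k
  induction k using Nat.strong_induction_on with
  | _ k ih =>
    intro f g n hk hf hg
    by_cases h : 9 < n
    · have hfpos : 0 < f := by omega
      have hgpos : 0 < g := by omega
      obtain ⟨f', rfl⟩ : ∃ f', f = f' + 1 := ⟨f - 1, by omega⟩
      obtain ⟨g', rfl⟩ : ∃ g', g = g' + 1 := ⟨g - 1, by omega⟩
      rw [pvReduceLoop, pvReduceMasterLoop]
      rw [if_pos h]
      by_cases hm : n = 11 ∨ n = 22 ∨ n = 33
      · have hc : pvMASTER_NUMBERS.contains n = true := by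
          rcases hm with h' | h' | h' <;> subst h' <;> rfl
        rw [Bool.true_and, hc, if_pos rfl, if_pos (Or.inr hm)]
      · have hc : pvMASTER_NUMBERS.contains n = false := by
          simp [pvMASTER_NUMBERS]; omega
        rw [Bool.true_and, hc, if_neg Bool.false_ne_true,
          if_neg (show ¬(n ≤ 9 ∨ n = 11 ∨ n = 22 ∨ n = 33) by omega)]
        have hds : pvDigitSumStr n = pvDigsum n := by
          rw [pvDigitSumStr_eq n (by omega), pvDigsum_eq n (by omega)]
        have h1 := pvDigsum_lt n h
        have h2 := pvDigsum_nonneg n (by omega)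
        rw [hds]
        exact ih (k - 1) (by omega) f' g' (pvDigsum n) (by omega) (by omega) (by omega)
    · cases f with
      | zero => cases g with
        | zero => rfl
        | succ g' => rw [pvReduceMasterLoop, if_pos (Or.inl (by omega))]; rfl
      | succ f' => cases g with
        | zero => rw [pvReduceLoop, if_neg h]; rfl
        | succ g' => rw [pvReduceLoop, pvReduceMasterLoop, if_neg h, if_pos (Or.inl (by omega))]

lemma pvReduce_true_eq (n : Int) : reduce_to_single n true = pvReduceMaster n :=
  pvReduce_true_aux n.toNat n.toNat n.toNat n le_rfl le_rfl le_rfl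

lemma pvDroot_congr (v w : Int) (hv : 0 < v) (hw : 0 < w)
    (h : v % 9 = w % 9) : pvDroot v = pvDroot w := by
  unfold pvDroot
  rw [if_neg (by omega), if_neg (by omega)]
  rw [PySem.Int.mod_eq_emod_of_pos (by norm_num), PySem.Int.mod_eq_emod_of_pos (by norm_num)]
  omega

lemma pvReduce_false_aux : ∀ (f : Nat) (v : Int), v.toNat ≤ f → 0 ≤ v →
    pvReduceLoop false f v = pvDroot v := by
  intro f
  induction f using Nat.strong_induction_on with
  | _ f ih =>
    intro v hf hv
    by_cases h : 9 < v
    · have hfpos : 0 < f := by omega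
      obtain ⟨f', rfl⟩ : ∃ f', f = f' + 1 := ⟨f - 1, by omega⟩
      rw [pvReduceLoop, if_pos h]
      simp only [Bool.false_and, Bool.false_eq_true, if_false]
      have h1 := pvDigitSumStr_lt v h
      have h2 := pvDigitSumStr_nonneg v (by omega)
      rw [ih f' (by omega) (pvDigitSumStr v) (by omega) h2]
      apply pvDroot_congr
      · rw [pvDigitSumStr_eq v (by omega)]
        exact_mod_cast pvDigitsSumPos v.toNat (by omega)
      · omega
      · rw [pvDigitSumStr_eq v (by omega)]
        have hmod := Nat.modEq_nine_digits_sum v.toNat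
        unfold Nat.ModEq at hmod
        omega
    · have hbase : pvDroot v = v := by
        unfold pvDroot
        by_cases h0 : v = 0
        · rw [if_pos h0, h0]
        · rw [if_neg h0]
          rw [PySem.Int.mod_eq_emod_of_pos (by norm_num)]
          omega
      cases f with
      | zero => rw [hbase]; rfl
      | succ f' => rw [pvReduceLoop, if_neg h, hbase]

lemma pvReduce_false_eq (v : Int) (hv : 0 ≤ v) : reduce_to_single v false = pvDroot v :=
  pvReduce_false_aux v.toNat v le_rfl hv

-- ===== VERDICT (by name: the statement is the Claim_ definition above) =====
theorem challenge_numbers_spec : Claim_equal_challenge_numbers := by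
  intro month day year _ hpre
  unfold Spec_challenge_numbers
  simp only [challenge_numbers, challenge_numbers_alt]
  have hy : pvDigitSumStr year = pvDigsum year := by
    rw [pvDigitSumStr_eq year hpre, pvDigsum_eq year hpre]
  rw [hy, pvReduce_true_eq month, pvReduce_true_eq day, pvReduce_true_eq (pvDigsum year)]
  rw [pvReduce_false_eq _ (abs_nonneg _), pvReduce_false_eq _ (abs_nonneg _),
      pvReduce_false_eq _ (abs_nonneg _), pvReduce_false_eq _ (abs_nonneg _)]
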